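-- pv_equiv track=rewrite | github.com/huytbvu/car-gen | car_data_generator/lib/basic_generator.py | _compute_polynomial_serie
-- ===== SOURCE A (Python) =====
-- def _compute_polynomial_serie(coefficients, data_range):
--   data = []
--   for x in range(data_range):
--     y = 0
--     for j in range(len(coefficients)):
--       y = y + coefficients[j] * x**j
--     data.append(y)
--   return data
-- ===== SOURCE B (Python) =====
-- def _compute_polynomial_serie(coefficients, data_range):
--   def horner(x):
--     acc = 0
--     for c in reversed(coefficients):
--       acc = acc * x + c
--     return acc
--   return [horner(x) for x in range(data_range)]
-- ===== Notes on version B (the rewrite author's own statement) =====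
-- stated objective: faster
-- what changed: Replaces the per-point sum of coefficients[j]*x**j (each power computed from scratch) by Horner's rule over the reversed coefficients, building the list with a comprehension instead of appends.
import Mathlib
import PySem

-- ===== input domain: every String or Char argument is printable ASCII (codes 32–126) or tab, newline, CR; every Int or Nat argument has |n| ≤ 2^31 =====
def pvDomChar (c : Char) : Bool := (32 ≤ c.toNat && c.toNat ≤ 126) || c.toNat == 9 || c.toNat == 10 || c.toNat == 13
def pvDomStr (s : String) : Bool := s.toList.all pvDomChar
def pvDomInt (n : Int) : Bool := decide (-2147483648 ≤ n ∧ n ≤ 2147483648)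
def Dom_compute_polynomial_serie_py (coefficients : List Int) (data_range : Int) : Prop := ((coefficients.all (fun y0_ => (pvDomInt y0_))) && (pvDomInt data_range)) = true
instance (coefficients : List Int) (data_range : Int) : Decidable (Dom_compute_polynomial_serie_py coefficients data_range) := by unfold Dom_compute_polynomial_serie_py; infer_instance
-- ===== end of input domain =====

-- B replaces A's per-point sum of coefficients[j] * x**j by Horner's rule over the
-- reversed coefficients (no exponentiation), building the list with a comprehension.


-- ===== PORT A =====
def compute_polynomial_serie_py (coefficients : List Int) (data_range : Int) : List Int :=
  (PySem.List.pyRange 0 data_range 1).foldl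
    (fun data x =>
      data ++ [(List.range coefficients.length).foldl
        (fun y (j : Nat) => y + PySem.List.pyGetD coefficients (j : Int) 0 * x ^ j) 0])
    []

-- ===== PORT B =====
def compute_polynomial_serie_py_alt (coefficients : List Int) (data_range : Int) : List Int :=
  (PySem.List.pyRange 0 data_range 1).map
    (fun x => coefficients.reverse.foldl (fun acc c => acc * x + c) 0)

-- ===== PRECONDITION & SPEC =====
def Spec_compute_polynomial_serie_py (coefficients : List Int) (data_range : Int) (out : List Int) : Prop := out = compute_polynomial_serie_py_alt coefficients data_range
instance (coefficients : List Int) (data_range : Int) (out : List Int) : Decidable (Spec_compute_polynomial_serie_py coefficients data_range out) := by unfold Spec_compute_polynomial_serie_py; infer_instance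

-- ===== CLAIM (what is proved, stated in full; the proofs are below) =====
def Claim_equal_compute_polynomial_serie_py : Prop := ∀ (coefficients : List Int) (data_range : Int), Dom_compute_polynomial_serie_py coefficients data_range → Spec_compute_polynomial_serie_py coefficients data_range (compute_polynomial_serie_py coefficients data_range)

-- ===== LEMMAS AND PROOFS =====

-- reference polynomial evaluation, proof-only
def pvPoly : List Int → Int → Int
  | [], _ => 0
  | c :: cs, x => c + x * pvPoly cs x

theorem horner_eq_pvPoly (cs : List Int) (x : Int) :
    cs.reverse.foldl (fun acc c => acc * x + c) 0 = pvPoly cs x := by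
  induction cs with
  | nil => simp [pvPoly]
  | cons c cs ih =>
    simp [pvPoly, List.foldl_append, ih]
    ring

theorem foldl_pow_shift0 (g : Nat → Int) (x : Int) :
    ∀ (l : List Nat) (a : Int),
      l.foldl (fun y j => y + g j * x ^ j) a
        = a + l.foldl (fun y j => y + g j * x ^ j) 0 := by
  intro l
  induction l with
  | nil => simp
  | cons h t ih =>
    intro a
    simp only [List.foldl_cons]
    rw [ih, ih (0 + g h * x ^ h)]
    ring

theorem foldl_pow_shift (g : Nat → Int) (x : Int) :
    ∀ (l : List Nat) (a : Int),
      l.foldl (fun y j => y + g j * x ^ (j + 1)) a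
        = a + x * l.foldl (fun y j => y + g j * x ^ j) 0 := by
  intro l
  induction l with
  | nil => simp
  | cons h t ih =>
    intro a
    simp only [List.foldl_cons]
    rw [ih, foldl_pow_shift0 g x t (0 + g h * x ^ h)]
    ring

theorem sum_eq_pvPoly (x : Int) :
    ∀ cs : List Int,
      (List.range cs.length).foldl (fun y j => y + cs.getD j 0 * x ^ j) 0 = pvPoly cs x := by
  intro cs
  induction cs with
  | nil => simp [pvPoly]
  | cons c cs ih =>
    simp only [List.length_cons, List.range_succ_eq_map, List.foldl_cons, List.foldl_map,
      Nat.succ_eq_add_one, List.getD_cons_succ, List.getD_cons_zero, pow_zero, mul_one, zero_add]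
    rw [foldl_pow_shift (fun j => cs.getD j 0) x, ih]
    simp [pvPoly]

-- ===== VERDICT (by name: the statement is the Claim_ definition above) =====
theorem compute_polynomial_serie_py_spec : Claim_equal_compute_polynomial_serie_py := by
  intro cs n _
  unfold Spec_compute_polynomial_serie_py compute_polynomial_serie_py compute_polynomial_serie_py_alt
  rw [PySem.List.foldl_append_singleton_eq_map]
  refine List.map_congr_left ?_
  intro x _
  simp only [PySem.List.pyGetD_natCast]
  rw [sum_eq_pvPoly, horner_eq_pvPoly]
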